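-- pv_equiv track=rewrite | github.com/alexandraback/datacollection | solutions_5738606668808192_1/Python/ahausch/C.py | asBase
-- ===== SOURCE A (Python) =====
-- def asBase(a, b):
-- 	s = 0
-- 	e = 1;
-- 	for i in range(len(a)):
-- 		if (a[-1 - i] == 1):
-- 			s += e
-- 		e *= b
-- 	return s
-- ===== SOURCE B (Python) =====
-- def asBase(a, b):
--     s = 0
--     for d in a:
--         s = s * b + (1 if d == 1 else 0)
--     return s
-- ===== Notes on version B (the rewrite author's own statement) =====
-- stated objective: idiomatic
-- what changed: Replaces the reverse-indexed loop that maintains an explicit incremental power e (two big-int multiplications/updates per step) with Horner's method: one forward pass and a single multiply-accumulate accumulator.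
import Mathlib
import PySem

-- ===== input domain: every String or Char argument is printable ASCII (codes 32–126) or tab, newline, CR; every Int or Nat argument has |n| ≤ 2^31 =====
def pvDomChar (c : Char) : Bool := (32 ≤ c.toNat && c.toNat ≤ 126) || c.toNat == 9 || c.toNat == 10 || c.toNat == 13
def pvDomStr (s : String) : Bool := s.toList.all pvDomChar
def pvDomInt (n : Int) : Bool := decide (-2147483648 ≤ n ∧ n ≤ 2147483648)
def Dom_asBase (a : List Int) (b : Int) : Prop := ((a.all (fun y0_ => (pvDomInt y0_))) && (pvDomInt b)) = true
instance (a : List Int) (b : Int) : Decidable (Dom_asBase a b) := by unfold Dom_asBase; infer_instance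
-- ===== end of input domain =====

-- B replaces A's reverse-indexed loop with power accumulator by a single forward Horner pass.

-- ===== PORT A =====
-- a[-1 - i] is always in range for i in range(len(a)), so the loop never raises;
-- the getD default 0 is never used.
def asBase (a : List Int) (b : Int) : Int :=
  ((PySem.List.pyRange 0 a.length 1).foldl
    (fun (se : Int × Int) i =>
      ((if PySem.List.pyGetD a (-1 - i) 0 == 1 then se.1 + se.2 else se.1), se.2 * b))
    (0, 1)).1

-- ===== PORT B =====
def asBase_alt (a : List Int) (b : Int) : Int :=
  a.foldl (fun s d => s * b + (if d == 1 then 1 else 0)) 0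

-- ===== PRECONDITION & SPEC =====
def Spec_asBase (a : List Int) (b : Int) (out : Int) : Prop := out = asBase_alt a b
instance (a : List Int) (b : Int) (out : Int) : Decidable (Spec_asBase a b out) := by unfold Spec_asBase; infer_instance

-- ===== CLAIM (what is proved, stated in full; the proofs are below) =====
def Claim_equal_asBase : Prop := ∀ (a : List Int) (b : Int), Dom_asBase a b → Spec_asBase a b (asBase a b)

-- ===== LEMMAS AND PROOFS =====

-- a[-1-i] is a.reverse[i]
theorem pyGetD_neg_reverse (a : List Int) (n : Nat) (h1 : n < a.length) :
    PySem.List.pyGetD a (-1 - (n : Int)) 0 = PySem.List.pyGetD a.reverse (n : Int) 0 := by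
  have hk : (-1 - (n : Int)) = -(((n + 1 : Nat)) : Int) := by push_cast; ring
  rw [hk, PySem.List.pyGetD_neg_natCast _ _ _ (by omega) (by omega),
      PySem.List.pyGetD_natCast,
      List.getD_eq_getElem _ _ (by simpa using h1), List.getElem_reverse]
  congr 1
  omega

-- the pair loop computes s + e * Horner of the reversed list
theorem pairLoop_eq_horner (b : Int) (l : List Int) (s e : Int) :
    (l.foldl (fun (se : Int × Int) d =>
        ((if d == 1 then se.1 + se.2 else se.1), se.2 * b)) (s, e)).1
      = s + e * (l.reverse.foldl (fun s d => s * b + (if d == 1 then 1 else 0)) 0) := by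
  induction l generalizing s e with
  | nil => simp
  | cons d t ih =>
      simp only [List.foldl_cons, List.reverse_cons, List.foldl_append, List.foldl_cons,
        List.foldl_nil]
      rw [ih]
      split <;> ring

-- ===== VERDICT (by name: the statement is the Claim_ definition above) =====
theorem asBase_spec : Claim_equal_asBase := by
  intro a b _
  unfold Spec_asBase asBase asBase_alt
  have hcongr :
      (PySem.List.pyRange 0 a.length 1).foldl
        (fun (se : Int × Int) i =>
          ((if PySem.List.pyGetD a (-1 - i) 0 == 1 then se.1 + se.2 else se.1), se.2 * b))
        (0, 1)
      = (PySem.List.pyRange 0 a.length 1).foldl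
        (fun (se : Int × Int) i =>
          ((if PySem.List.pyGetD a.reverse i 0 == 1 then se.1 + se.2 else se.1), se.2 * b))
        (0, 1) := by
    apply PySem.List.foldl_congr_mem
    intro se i hi
    rw [PySem.List.mem_pyRange_one] at hi
    obtain ⟨n, rfl⟩ : ∃ n : Nat, i = (n : Int) := ⟨i.toNat, by omega⟩
    rw [pyGetD_neg_reverse a n (by omega)]
  rw [hcongr]
  have hlen : (a.length : Int) = (a.reverse.length : Int) := by simp
  rw [hlen, PySem.List.foldl_pyRange_zero_pyGetD' a.reverse 0
      (fun (se : Int × Int) d => ((if d == 1 then se.1 + se.2 else se.1), se.2 * b)) (0, 1)]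
  rw [pairLoop_eq_horner b a.reverse 0 1]
  simp
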